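-- pv_equiv track=rewrite | github.com/AlxStg/Analise_Olx | pack.py | best_match_fipe
-- ===== SOURCE A (Python) =====
-- def best_match_fipe(anuncio, lista_marca, fipes):
--     # Encontrar melhor resultado por id:
--
--                     ## Compara quantas palavras do id do anuncio coincidem no fipe:
--                     lista_com_pts = []
--                     mod_an_quebr = anuncio['Modelo'].split()
--                     for c in lista_marca:
--                         pontos_no_id = {}
--                         pts_mod = 0
--                         for palavra in mod_an_quebr:
--                             if palavra in fipes[c]['id']:
--                                 pts_mod += 1
--                         pontos_no_id["posicao"] = c
--                         pontos_no_id['pts'] = pts_mod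
--                         lista_com_pts.append(pontos_no_id)
--
--                     ## Encontra maior pontuação
--                     match_fipe = []
--                     maior_pts = 0
--                     for c in lista_com_pts:
--                         if c['pts'] > maior_pts:
--                             maior_pts = c['pts']
--
--                     for c in lista_com_pts:
--                         if c['pts'] == maior_pts:
--                             match_fipe.append(c['posicao'])
--                     return match_fipe
-- ===== SOURCE B (Python) =====
-- def best_match_fipe(anuncio, lista_marca, fipes):
--     # Single pass with a running best score; best_pts starts at 0 so an
--     # all-zero round still returns every candidate (as in the original).
--     palavras = anuncio['Modelo'].split()
--     best_pts = 0
--     match_fipe = []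
--     for c in lista_marca:
--         pts = sum(1 for p in palavras if p in fipes[c]['id'])
--         if pts > best_pts:
--             best_pts = pts
--             match_fipe = [c]
--         elif pts == best_pts:
--             match_fipe.append(c)
--     return match_fipe
-- ===== Notes on version B (the rewrite author's own statement) =====
-- stated objective: simpler
-- what changed: Replaces A's three passes (build a list of score dicts, scan for the maximum, scan again to collect) with one pass keeping a running best score and the current list of best candidates, and computes each score with a sum over a generator instead of an explicit counter loop.
import Mathlib
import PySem

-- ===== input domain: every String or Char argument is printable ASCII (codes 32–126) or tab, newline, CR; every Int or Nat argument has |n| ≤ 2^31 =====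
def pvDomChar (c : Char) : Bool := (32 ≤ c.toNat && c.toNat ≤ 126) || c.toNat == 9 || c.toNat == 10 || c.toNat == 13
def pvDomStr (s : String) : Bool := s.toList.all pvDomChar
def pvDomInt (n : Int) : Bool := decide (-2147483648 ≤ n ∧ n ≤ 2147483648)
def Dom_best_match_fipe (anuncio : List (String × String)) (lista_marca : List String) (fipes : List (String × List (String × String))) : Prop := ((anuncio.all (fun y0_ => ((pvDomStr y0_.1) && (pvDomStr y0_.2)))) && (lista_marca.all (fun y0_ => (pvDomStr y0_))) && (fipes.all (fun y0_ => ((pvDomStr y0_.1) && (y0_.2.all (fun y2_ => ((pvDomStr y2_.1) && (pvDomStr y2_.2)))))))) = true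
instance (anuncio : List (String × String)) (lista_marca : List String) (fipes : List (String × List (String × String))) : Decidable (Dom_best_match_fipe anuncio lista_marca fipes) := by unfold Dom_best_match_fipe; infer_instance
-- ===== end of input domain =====

-- B replaces A's three passes (score list, max scan, collect scan) with one
-- running-best pass; objective: simpler. Equivalence is about the return value.

-- ===== PORT A =====
-- A's dicts {'posicao': c, 'pts': pts} hold values of two types; they are ported
-- as the pair (c, pts), accessed only at those two fixed keys.
def best_match_fipe (anuncio : List (String × String)) (lista_marca : List String) (fipes : List (String × List (String × String))) : List String :=
  let mod_an_quebr := PySem.Str.split₀ ((PySem.Dict.get? (PySem.Dict.mk anuncio) "Modelo").getD "")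
  let lista_com_pts : List (String × Int) := lista_marca.foldl (fun acc c =>
      let idc := (PySem.Dict.get? (PySem.Dict.mk ((PySem.Dict.get? (PySem.Dict.mk fipes) c).getD [])) "id").getD ""
      let pts_mod : Int := mod_an_quebr.foldl (fun p palavra => if PySem.Str.isIn palavra idc then p + 1 else p) 0
      acc ++ [(c, pts_mod)]) []
  let maior_pts : Int := lista_com_pts.foldl (fun m cp => if cp.2 > m then cp.2 else m) 0
  lista_com_pts.foldl (fun ms cp => if cp.2 = maior_pts then ms ++ [cp.1] else ms) []

-- ===== PORT B =====
def best_match_fipe_alt (anuncio : List (String × String)) (lista_marca : List String) (fipes : List (String × List (String × String))) : List String :=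
  let palavras := PySem.Str.split₀ ((PySem.Dict.get? (PySem.Dict.mk anuncio) "Modelo").getD "")
  (lista_marca.foldl (fun (st : Int × List String) c =>
      let idc := (PySem.Dict.get? (PySem.Dict.mk ((PySem.Dict.get? (PySem.Dict.mk fipes) c).getD [])) "id").getD ""
      let pts : Int := (palavras.countP (fun p => PySem.Str.isIn p idc) : Nat)
      if pts > st.1 then (pts, [c])
      else if pts = st.1 then (st.1, st.2 ++ [c])
      else st) ((0 : Int), ([] : List String))).2

-- ===== PRECONDITION & SPEC =====
-- Pre_ excludes exactly the inputs where A raises KeyError: anuncio lacking the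
-- key 'Modelo', or some c in lista_marca missing from fipes or whose dict lacks 'id'.
def Pre_best_match_fipe (anuncio : List (String × String)) (lista_marca : List String) (fipes : List (String × List (String × String))) : Prop :=
  (PySem.Dict.get? (PySem.Dict.mk anuncio) "Modelo").isSome = true ∧
  ∀ c ∈ lista_marca, ((PySem.Dict.get? (PySem.Dict.mk fipes) c).map
      (fun d => (PySem.Dict.get? (PySem.Dict.mk d) "id").isSome)).getD false = true
instance (anuncio : List (String × String)) (lista_marca : List String) (fipes : List (String × List (String × String))) : Decidable (Pre_best_match_fipe anuncio lista_marca fipes) := by unfold Pre_best_match_fipe; infer_instance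

def pvWitness_best_match_fipe : (List (String × String)) × List String × (List (String × List (String × String))) :=
  ([("Modelo", "uno mille")], ["f1", "f2"], [("f1", [("id", "fiat uno")]), ("f2", [("id", "gol")])])

def Spec_best_match_fipe (anuncio : List (String × String)) (lista_marca : List String) (fipes : List (String × List (String × String))) (out : List String) : Prop := out = best_match_fipe_alt anuncio lista_marca fipes
instance (anuncio : List (String × String)) (lista_marca : List String) (fipes : List (String × List (String × String))) (out : List String) : Decidable (Spec_best_match_fipe anuncio lista_marca fipes out) := by unfold Spec_best_match_fipe; infer_instance

-- ===== CLAIM (what is proved, stated in full; the proofs are below) =====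
def Claim_equal_best_match_fipe : Prop := ∀ (anuncio : List (String × String)) (lista_marca : List String) (fipes : List (String × List (String × String))), Dom_best_match_fipe anuncio lista_marca fipes → Pre_best_match_fipe anuncio lista_marca fipes → Spec_best_match_fipe anuncio lista_marca fipes (best_match_fipe anuncio lista_marca fipes)

-- ===== LEMMAS AND PROOFS =====

-- running maximum of scores g over l, started at b
def pvM (g : String → Int) (l : List String) (b : Int) : Int :=
  l.foldl (fun m c => if g c > m then g c else m) b

lemma pvM_le (g : String → Int) (l : List String) (b : Int) : b ≤ pvM g l b := by
  induction l generalizing b with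
  | nil => simp [pvM]
  | cons c t ih =>
    simp only [pvM, List.foldl_cons]
    split_ifs with h
    · exact le_trans (le_of_lt h) (ih (g c))
    · exact ih b

lemma bfold_eq (g : String → Int) (l : List String) (b : Int) (acc : List String) :
    l.foldl (fun st c =>
        if g c > st.1 then (g c, [c])
        else if g c = st.1 then (st.1, st.2 ++ [c])
        else st) (b, acc)
    = (pvM g l b, (if pvM g l b = b then acc else []) ++ l.filter (fun c => g c = pvM g l b)) := by
  induction l generalizing b acc with
  | nil => simp [pvM]
  | cons c t ih =>
    have hM : pvM g (c :: t) b = pvM g t (if g c > b then g c else b) := by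
      simp [pvM, List.foldl_cons]
    simp only [List.foldl_cons]
    by_cases h1 : g c > b
    · rw [if_pos h1, ih]
      have hM' : pvM g (c :: t) b = pvM g t (g c) := by rw [hM, if_pos h1]
      have hgc : g c ≤ pvM g t (g c) := pvM_le g t (g c)
      have hne : ¬ (pvM g t (g c) = b) := by omega
      rw [hM', if_neg hne]
      simp only [List.filter_cons]
      by_cases h2 : g c = pvM g t (g c)
      · have h2' : pvM g t (g c) = g c := h2.symm
        simp [h2']
      · have h2' : ¬ (pvM g t (g c) = g c) := fun e => h2 e.symm
        simp [h2, h2']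
    · rw [if_neg h1]
      have hb : g c ≤ b := le_of_not_gt h1
      have hM' : pvM g (c :: t) b = pvM g t b := by rw [hM, if_neg h1]
      have hbM : b ≤ pvM g t b := pvM_le g t b
      by_cases h2 : g c = b
      · rw [if_pos h2, ih, hM']
        simp only [List.filter_cons]
        by_cases h3 : pvM g t b = b
        · have hcm : g c = pvM g t b := by omega
          simp [h3, hcm]
        · have hcm : ¬ (g c = pvM g t b) := by omega
          simp [h3, hcm]
      · rw [if_neg h2, ih, hM']
        have hlt : g c < b := lt_of_le_of_ne hb h2
        have hcm : ¬ (g c = pvM g t b) := by omega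
        simp [hcm]

lemma scores_eq_map (g : String → Int) (l : List String) (acc : List (String × Int)) :
    l.foldl (fun acc c => acc ++ [(c, g c)]) acc = acc ++ l.map (fun c => (c, g c)) := by
  induction l generalizing acc with
  | nil => simp
  | cons c t ih => simp [List.foldl_cons, ih]

lemma collect_eq_filter (g : String → Int) (m : Int) (l : List String) (acc : List String) :
    (l.map (fun c => (c, g c))).foldl (fun ms cp => if cp.2 = m then ms ++ [cp.1] else ms) acc
    = acc ++ l.filter (fun c => g c = m) := by
  induction l generalizing acc with
  | nil => simp
  | cons c t ih =>
    simp only [List.map_cons, List.foldl_cons, List.filter_cons]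
    by_cases h : g c = m
    · simp [h, ih]
    · simp [h, ih]

-- the score each candidate gets: how many words of w occur in idf c
def pvSc (w : List String) (idf : String → String) (c : String) : Int :=
  ((w.countP (fun p => PySem.Str.isIn p (idf c))) : Nat)

lemma generic (w : List String) (idf : String → String) (l : List String) :
    (let lcp : List (String × Int) := l.foldl (fun acc c =>
        acc ++ [(c, w.foldl (fun p pal => if PySem.Str.isIn pal (idf c) then p + 1 else p) 0)]) [];
     let maior : Int := lcp.foldl (fun m cp => if cp.2 > m then cp.2 else m) 0;
     lcp.foldl (fun ms cp => if cp.2 = maior then ms ++ [cp.1] else ms) [])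
    = (l.foldl (fun (st : Int × List String) c =>
        if (((w.countP (fun p => PySem.Str.isIn p (idf c))) : Nat) : Int) > st.1
        then ((((w.countP (fun p => PySem.Str.isIn p (idf c))) : Nat) : Int), [c])
        else if (((w.countP (fun p => PySem.Str.isIn p (idf c))) : Nat) : Int) = st.1
        then (st.1, st.2 ++ [c]) else st) ((0 : Int), ([] : List String))).2 := by
  have hgc : ∀ c : String, (((w.countP (fun p => PySem.Str.isIn p (idf c))) : Nat) : Int) = pvSc w idf c :=
    fun c => rfl
  have hpts : ∀ c : String,
      (w.foldl (fun p pal => if PySem.Str.isIn pal (idf c) then p + 1 else p) (0 : Int)) = pvSc w idf c := by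
    intro c
    rw [PySem.List.foldl_if_add_one]
    simp [pvSc]
  simp only [hpts, hgc]
  rw [scores_eq_map (pvSc w idf) l []]
  simp only [List.nil_append]
  have hmax : (l.map (fun c => (c, pvSc w idf c))).foldl (fun m cp => if cp.2 > m then cp.2 else m) 0
      = pvM (pvSc w idf) l 0 := by
    rw [List.foldl_map]; rfl
  simp only [hmax]
  rw [collect_eq_filter (pvSc w idf) (pvM (pvSc w idf) l 0) l [],
      bfold_eq (pvSc w idf) l 0 []]
  simp

lemma ports_agree (anuncio : List (String × String)) (lista_marca : List String) (fipes : List (String × List (String × String))) :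
    best_match_fipe anuncio lista_marca fipes = best_match_fipe_alt anuncio lista_marca fipes :=
  generic (PySem.Str.split₀ ((PySem.Dict.get? (PySem.Dict.mk anuncio) "Modelo").getD ""))
    (fun c => (PySem.Dict.get? (PySem.Dict.mk ((PySem.Dict.get? (PySem.Dict.mk fipes) c).getD [])) "id").getD "")
    lista_marca

-- ===== VERDICT (by name: the statement is the Claim_ definition above) =====
theorem best_match_fipe_spec : Claim_equal_best_match_fipe := by
  intro anuncio lista_marca fipes _ _
  unfold Spec_best_match_fipe
  exact ports_agree anuncio lista_marca fipes
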